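-- pv_equiv track=rewrite | github.com/Lu5t0/Tema-Curs-Pyhon-Dragos-Stirbu | CURS 10/EX 11.py | sting_nou
-- ===== SOURCE A (Python) =====
-- def sting_nou(text):
--     text1 = text.split()
--     lista_noua = []
--     for char in range(len(text1)):
--         if char == 0:
--             lista_noua.append(text1[-1])
--         elif char == len(text1) - 1:
--             lista_noua.append(text1[0])
--         else:
--             lista_noua.append(text1[char])
--     return " ".join(lista_noua)
-- ===== SOURCE B (Python) =====
-- def sting_nou(text):
--     words = text.split()
--     if words:
--         words[0], words[-1] = words[-1], words[0]
--     return " ".join(words)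
-- ===== Notes on version B (the rewrite author's own statement) =====
-- stated objective: simpler
-- what changed: Replaces the per-index rebuild loop with first/middle/last branching by a single in-place tuple swap of the first and last words followed by a join.
import Mathlib
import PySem

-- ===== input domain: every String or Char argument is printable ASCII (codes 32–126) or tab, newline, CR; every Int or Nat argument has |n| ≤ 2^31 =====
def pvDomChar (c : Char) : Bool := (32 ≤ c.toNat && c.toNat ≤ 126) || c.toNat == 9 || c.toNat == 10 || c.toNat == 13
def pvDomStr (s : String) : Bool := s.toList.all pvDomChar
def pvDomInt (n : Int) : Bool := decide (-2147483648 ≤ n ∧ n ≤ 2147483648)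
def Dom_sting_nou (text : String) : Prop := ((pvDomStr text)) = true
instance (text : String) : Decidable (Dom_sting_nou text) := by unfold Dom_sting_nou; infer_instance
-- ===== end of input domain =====

-- B swaps the first and last word in place instead of rebuilding the word list index by index.

-- ===== PORT A =====
-- indices produced by range(len(text1)) are always in range, so pyGetD is exact here
def sting_nou (text : String) : String :=
  let text1 := PySem.Str.split₀ text
  let lista_noua := (PySem.List.pyRange 0 (text1.length : Int) 1).foldl
    (fun acc ch =>
      if ch = 0 then acc ++ [PySem.List.pyGetD text1 (-1) ""]
      else if ch = (text1.length : Int) - 1 then acc ++ [PySem.List.pyGetD text1 0 ""]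
      else acc ++ [PySem.List.pyGetD text1 ch ""]) []
  PySem.Str.join " " lista_noua

-- ===== PORT B =====
def sting_nou_alt (text : String) : String :=
  let words := PySem.Str.split₀ text
  match words with
  | [] => PySem.Str.join " " []
  | w :: rest =>
    -- words[0], words[-1] = words[-1], words[0]
    match rest.getLast? with
    | none => PySem.Str.join " " [w]
    | some l => PySem.Str.join " " (l :: (rest.dropLast ++ [w]))

-- ===== PRECONDITION & SPEC =====
def Spec_sting_nou (text : String) (out : String) : Prop := out = sting_nou_alt text
instance (text : String) (out : String) : Decidable (Spec_sting_nou text out) := by unfold Spec_sting_nou; infer_instance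

-- ===== CLAIM (what is proved, stated in full; the proofs are below) =====
def Claim_equal_sting_nou : Prop := ∀ (text : String), Dom_sting_nou text → Spec_sting_nou text (sting_nou text)

-- ===== LEMMAS AND PROOFS =====

-- A's loop, run on a word list with at least two elements w :: ms ++ [l], builds l :: ms ++ [w].
theorem sting_nou_fold_eq (w l : String) (ms : List String) :
    (PySem.List.pyRange 0 ((w :: ms ++ [l]).length : Int) 1).foldl
      (fun acc ch =>
        if ch = 0 then acc ++ [PySem.List.pyGetD (w :: ms ++ [l]) (-1) ""]
        else if ch = ((w :: ms ++ [l]).length : Int) - 1 then acc ++ [PySem.List.pyGetD (w :: ms ++ [l]) 0 ""]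
        else acc ++ [PySem.List.pyGetD (w :: ms ++ [l]) ch ""]) []
    = l :: (ms ++ [w]) := by
  set ws : List String := w :: ms ++ [l] with hws
  have hlen : (ws.length : Int) = (ms.length : Int) + 2 := by simp [hws]; omega
  -- combine the three appending branches into one append
  have hbody : ∀ (acc : List String) (ch : Int),
      (if ch = 0 then acc ++ [PySem.List.pyGetD ws (-1) ""]
       else if ch = (ws.length : Int) - 1 then acc ++ [PySem.List.pyGetD ws 0 ""]
       else acc ++ [PySem.List.pyGetD ws ch ""])
      = acc ++ [if ch = 0 then PySem.List.pyGetD ws (-1) ""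
                else if ch = (ws.length : Int) - 1 then PySem.List.pyGetD ws 0 ""
                else PySem.List.pyGetD ws ch ""] := by
    intro acc ch; split_ifs <;> rfl
  simp only [hbody]
  rw [PySem.List.foldl_append_singleton_eq_map]
  -- split the index range into first, middle, last
  have hA : PySem.List.pyRange 0 (ws.length : Int) 1
      = PySem.List.pyRange 0 1 1 ++ PySem.List.pyRange 1 (ws.length : Int) 1 :=
    PySem.List.pyRange_one_append 0 1 (ws.length : Int) (by omega) (by omega)
  have hB : PySem.List.pyRange 1 (ws.length : Int) 1
      = PySem.List.pyRange 1 ((ws.length : Int) - 1) 1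
        ++ PySem.List.pyRange ((ws.length : Int) - 1) (ws.length : Int) 1 :=
    PySem.List.pyRange_one_append 1 ((ws.length : Int) - 1) (ws.length : Int) (by omega) (by omega)
  have h01 : PySem.List.pyRange 0 1 1 = [0] := by
    simpa using PySem.List.pyRange_one_singleton 0
  have hC : PySem.List.pyRange ((ws.length : Int) - 1) (ws.length : Int) 1 = [(ws.length : Int) - 1] := by
    have := PySem.List.pyRange_one_singleton ((ws.length : Int) - 1)
    rwa [sub_add_cancel] at this
  rw [hA, hB, h01, hC]
  simp only [List.map_cons, List.map_append, List.map_nil]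
  have h0 : PySem.List.pyGetD ws (-1) "" = l := by
    simpa [hws] using PySem.List.pyGetD_neg_one_append_singleton (xs := w :: ms) (x := l) (d := "")
  -- middle indices 1 ≤ ch ≤ len-2 pick up exactly ms
  have hmid : (PySem.List.pyRange 1 ((ws.length : Int) - 1) 1).map
      (fun ch => if ch = 0 then PySem.List.pyGetD ws (-1) ""
                 else if ch = (ws.length : Int) - 1 then PySem.List.pyGetD ws 0 ""
                 else PySem.List.pyGetD ws ch "") = ms := by
    have hcong : (PySem.List.pyRange 1 ((ws.length : Int) - 1) 1).map
        (fun ch => if ch = 0 then PySem.List.pyGetD ws (-1) ""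
                   else if ch = (ws.length : Int) - 1 then PySem.List.pyGetD ws 0 ""
                   else PySem.List.pyGetD ws ch "")
        = (PySem.List.pyRange 1 (((w :: ms).length : Int)) 1).map
            (fun ch => PySem.List.pyGetD (w :: ms) ch "") := by
      have hrange : ((w :: ms).length : Int) = (ws.length : Int) - 1 := by simp [hws]
      rw [hrange]
      refine List.map_congr_left ?_
      intro ch hch
      rw [PySem.List.mem_pyRange_one] at hch
      rw [if_neg (by omega), if_neg (by omega)]
      -- ch indexes into the prefix w :: ms of ws
      have hch' : ch = ((ch.toNat : Nat) : Int) := by omega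
      rw [hch', PySem.List.pyGetD_natCast, PySem.List.pyGetD_natCast, hws,
        show (w :: ms ++ [l]) = (w :: ms) ++ [l] by simp]
      rw [List.getD_eq_getElem?_getD, List.getD_eq_getElem?_getD,
        List.getElem?_append_left (by simp; omega)]
    rw [hcong]
    have := PySem.List.map_pyGetD_pyRange (xs := w :: ms) (a := 1) (d := "") (by omega)
    simpa using this
  have hw0 : PySem.List.pyGetD ws 0 "" = w := by
    rw [hws]; simp [PySem.List.pyGetD_zero_cons]
  have hne : ¬((ws.length : Int) - 1 = 0) := by omega
  rw [hmid]
  simp [h0, hne, hw0]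

-- ===== VERDICT (by name: the statement is the Claim_ definition above) =====
theorem sting_nou_spec : Claim_equal_sting_nou := by
  intro text _
  show sting_nou text = sting_nou_alt text
  unfold sting_nou sting_nou_alt
  rcases h : PySem.Str.split₀ text with _ | ⟨w, rest⟩
  · simp
  · rcases hr : rest.getLast? with _ | l
    · -- single word
      rcases List.getLast?_eq_none_iff.mp hr with rfl
      have hg : PySem.List.pyGetD [w] (-1) "" = w := by
        simpa using PySem.List.pyGetD_neg_one_append_singleton (xs := ([] : List String)) (x := w) (d := "")
      simp [PySem.List.pyRange_one_cons, PySem.List.pyRange_one_eq_nil, hg]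
    · -- at least two words: rest = ms ++ [l]
      obtain ⟨ms, rfl⟩ : ∃ ms, rest = ms ++ [l] := by
        rcases List.eq_nil_or_concat rest with rfl | ⟨ms, x, rfl⟩
        · simp at hr
        · have hx : x = l := by simpa using hr
          exact ⟨ms, by simp [hx]⟩
      have hfold := sting_nou_fold_eq w l ms
      dsimp only
      simp only [List.cons_append] at hfold ⊢
      rw [hfold, hr]
      simp
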